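-- pv_equiv track=rewrite | github.com/chirilaciprian/ProgramareInPython | Tema2/Tema2.py | spectators_cant_see
-- ===== SOURCE A (Python) =====
-- def spectators_cant_see(matrix):
--     bad_seats=[]
--     rows = len(matrix)
--     columns = []
--     for col in range(len(matrix[0])):
--         column_elements = []
--         for row in range(rows):
--             column_elements.append(matrix[row][col])
--         columns.append(column_elements)
--     for c in range(len(columns)):
--         for r in range(1,len(columns[c])):
--             max_val=max(columns[c][:r])
--             if columns[c][r]<=max_val:
--                 bad_seats.append((r,c))
--     return bad_seats
-- ===== SOURCE B (Python) =====
-- def spectators_cant_see(matrix):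
--     bad_seats = []
--     for c in range(len(matrix[0])):
--         best = matrix[0][c]
--         for r in range(1, len(matrix)):
--             v = matrix[r][c]
--             if v <= best:
--                 bad_seats.append((r, c))
--             else:
--                 best = v
--     return bad_seats
-- ===== Notes on version B (the rewrite author's own statement) =====
-- stated objective: faster
-- what changed: B drops A's explicit transpose and, instead of recomputing max(column[:r]) for every row, keeps a running prefix maximum per column in a single scan.
import Mathlib
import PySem

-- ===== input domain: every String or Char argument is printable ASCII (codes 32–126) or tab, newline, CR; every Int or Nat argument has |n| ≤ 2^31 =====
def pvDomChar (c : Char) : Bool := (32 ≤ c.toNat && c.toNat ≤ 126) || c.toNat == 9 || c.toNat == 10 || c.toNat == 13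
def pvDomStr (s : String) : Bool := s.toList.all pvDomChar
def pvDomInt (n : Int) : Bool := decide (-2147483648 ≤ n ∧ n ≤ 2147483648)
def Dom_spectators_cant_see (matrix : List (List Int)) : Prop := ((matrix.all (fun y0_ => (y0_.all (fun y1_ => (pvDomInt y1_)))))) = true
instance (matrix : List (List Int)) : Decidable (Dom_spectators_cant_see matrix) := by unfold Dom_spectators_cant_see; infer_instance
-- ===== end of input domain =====

-- B replaces A's explicit column transpose and per-row recomputation of max(column[:r])
-- by a single scan per column keeping a running prefix maximum (objective: faster, asymptotic).

-- ===== PORT A =====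
def spectators_cant_see (matrix : List (List Int)) : List (Int × Int) :=
  let rows : Int := (matrix.length : Int)
  let columns : List (List Int) :=
    (PySem.List.pyRange 0 ((PySem.List.pyGetD matrix 0 []).length : Int) 1).foldl
      (fun cols col =>
        cols ++ [(PySem.List.pyRange 0 rows 1).foldl
          (fun ce row => ce ++ [PySem.List.pyGetD (PySem.List.pyGetD matrix row []) col 0]) []])
      []
  (PySem.List.pyRange 0 (columns.length : Int) 1).foldl
    (fun bad c =>
      let colc := PySem.List.pyGetD columns c []
      (PySem.List.pyRange 1 (colc.length : Int) 1).foldl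
        (fun bad2 r =>
          let max_val : Int :=
            (PySem.List.max? (PySem.List.slice colc none (some r)) (fun x => x)).getD 0
          if PySem.List.pyGetD colc r 0 ≤ max_val then bad2 ++ [(r, c)] else bad2)
        bad)
    []

-- ===== PORT B =====
def spectators_cant_see_alt (matrix : List (List Int)) : List (Int × Int) :=
  (PySem.List.pyRange 0 ((PySem.List.pyGetD matrix 0 []).length : Int) 1).foldl
    (fun bad c =>
      ((PySem.List.pyRange 1 (matrix.length : Int) 1).foldl
        (fun (s : Int × List (Int × Int)) r =>
          let v := PySem.List.pyGetD (PySem.List.pyGetD matrix r []) c 0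
          if v ≤ s.1 then (s.1, s.2 ++ [(r, c)]) else (v, s.2))
        (PySem.List.pyGetD (PySem.List.pyGetD matrix 0 []) c 0, bad)).2)
    []

-- ===== PRECONDITION & SPEC =====
-- Pre_ excludes exactly the inputs where Python A raises: the empty matrix (len(matrix[0]) → IndexError)
-- and matrices with a row shorter than the first row (matrix[row][col] → IndexError).
def Pre_spectators_cant_see (matrix : List (List Int)) : Prop :=
  matrix ≠ [] ∧ ∀ row ∈ matrix, (PySem.List.pyGetD matrix 0 []).length ≤ row.length
instance (matrix : List (List Int)) : Decidable (Pre_spectators_cant_see matrix) := by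
  unfold Pre_spectators_cant_see; infer_instance
def pvWitness_spectators_cant_see : List (List Int) := [[3, 1], [2, 4]]

def Spec_spectators_cant_see (matrix : List (List Int)) (out : List (Int × Int)) : Prop := out = spectators_cant_see_alt matrix
instance (matrix : List (List Int)) (out : List (Int × Int)) : Decidable (Spec_spectators_cant_see matrix out) := by unfold Spec_spectators_cant_see; infer_instance

-- ===== CLAIM (what is proved, stated in full; the proofs are below) =====
def Claim_equal_spectators_cant_see : Prop := ∀ (matrix : List (List Int)), Dom_spectators_cant_see matrix → Pre_spectators_cant_see matrix → Spec_spectators_cant_see matrix (spectators_cant_see matrix)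

-- ===== LEMMAS AND PROOFS =====

-- max over a list extended by one element: one more step of the foldl defining max?.
theorem pv_max?_append_one (xs : List Int) (v m : Int)
    (h : PySem.List.max? xs (fun x => x) = some m) :
    PySem.List.max? (xs ++ [v]) (fun x => x) = some (if m < v then v else m) := by
  simp only [PySem.List.max?] at h ⊢
  rw [List.foldl_append, h]
  simp only [List.foldl_cons, List.foldl_nil]
  split_ifs <;> rfl

-- per-column core: A's "compare against max of the prefix" loop equals B's running-maximum loop,
-- given that the running state m is the maximum of the first j elements.
theorem pv_key (colc : List Int) (c : Int) :
    ∀ (k j : Nat) (m : Int) (bad : List (Int × Int)),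
      j + k = colc.length → 1 ≤ j →
      PySem.List.max? (colc.take j) (fun x => x) = some m →
      (PySem.List.pyRange (j : Int) (colc.length : Int) 1).foldl
          (fun bad2 r =>
            if PySem.List.pyGetD colc r 0 ≤
                (PySem.List.max? (List.take r.toNat colc) (fun x => x)).getD 0
            then bad2 ++ [(r, c)] else bad2) bad
      = ((PySem.List.pyRange (j : Int) (colc.length : Int) 1).foldl
          (fun s r =>
            if PySem.List.pyGetD colc r 0 ≤ s.1
            then (s.1, s.2 ++ [(r, c)]) else (PySem.List.pyGetD colc r 0, s.2))
          (m, bad)).2 := by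
  intro k
  induction k with
  | zero =>
    intro j m bad hlen _ _
    rw [PySem.List.pyRange_one_eq_nil (by omega)]
    rfl
  | succ k ih =>
    intro j m bad hlen hj hmax
    have hjlt : j < colc.length := by omega
    rw [PySem.List.pyRange_one_cons (by exact_mod_cast hjlt)]
    simp only [List.foldl_cons]
    have htoNat : ((j : Int)).toNat = j := by omega
    have hget : PySem.List.pyGetD colc (j : Int) 0 = colc[j]'hjlt := by
      rw [PySem.List.pyGetD_eq_getElem colc 0 (by omega) (by exact_mod_cast hjlt)]
      simp [htoNat]
    have htake : colc.take (j + 1) = colc.take j ++ [colc[j]'hjlt] := by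
      rw [List.take_add_one]
      simp [List.getElem?_eq_getElem hjlt]
    have hcast : ((j : Int) + 1) = ((j + 1 : Nat) : Int) := by push_cast; ring
    rw [hget, htoNat, hmax]
    simp only [Option.getD_some]
    by_cases hle : colc[j]'hjlt ≤ m
    · rw [if_pos hle, if_pos hle, hcast]
      exact ih (j + 1) m (bad ++ [((j : Int), c)]) (by omega) (by omega)
        (by rw [htake, pv_max?_append_one _ _ _ hmax, if_neg (not_lt.mpr hle)])
    · rw [if_neg hle, if_neg hle, hcast]
      exact ih (j + 1) (colc[j]'hjlt) bad (by omega) (by omega)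
        (by rw [htake, pv_max?_append_one _ _ _ hmax, if_pos (by omega : m < colc[j]'hjlt)])

theorem pv_ports_eq (matrix : List (List Int)) :
    spectators_cant_see matrix = spectators_cant_see_alt matrix := by
  rcases matrix with _ | ⟨row0, rest⟩
  · rfl
  have hn : PySem.List.pyGetD (row0 :: rest) 0 [] = row0 := by
    rw [PySem.List.pyGetD_of_nonneg _ _ le_rfl]; rfl
  simp only [spectators_cant_see, spectators_cant_see_alt, hn,
    PySem.List.foldl_append_singleton_eq_map, List.nil_append,
    List.length_map, PySem.List.length_pyRange_one, Int.sub_zero, Int.toNat_natCast]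
  apply PySem.List.foldl_congr_mem
  intro bad c hc
  obtain ⟨hc0, hclt⟩ := PySem.List.mem_pyRange_one.mp hc
  have hklt : c.toNat < row0.length := by omega
  have hk : c = ((c.toNat : Nat) : Int) := by omega
  have hcols : PySem.List.pyGetD
      (List.map (fun col => List.map
          (fun row => PySem.List.pyGetD (PySem.List.pyGetD (row0 :: rest) row []) col 0)
          (PySem.List.pyRange 0 ((row0 :: rest).length : Int)))
        (PySem.List.pyRange 0 (row0.length : Int))) c []
      = List.map (fun row => PySem.List.pyGetD (PySem.List.pyGetD (row0 :: rest) row []) c 0)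
          (PySem.List.pyRange 0 ((row0 :: rest).length : Int)) := by
    rw [hk, PySem.List.pyGetD_map_pyRange _ _ _ _ hklt]
  rw [hcols]
  set L : Nat := (row0 :: rest).length with hL
  set F : Int → Int := fun row => PySem.List.pyGetD (PySem.List.pyGetD (row0 :: rest) row []) c 0 with hF
  set colc : List Int := List.map F (PySem.List.pyRange 0 (L : Int)) with hcolc
  have hclen : colc.length = L := by
    simp [hcolc, PySem.List.length_pyRange_one]
  have hFcol : ∀ r : Int, 1 ≤ r → r < (L : Int) → PySem.List.pyGetD colc r 0 = F r := by
    intro r h1 h2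
    have hr : r = ((r.toNat : Nat) : Int) := by omega
    rw [hcolc, hr, PySem.List.pyGetD_map_pyRange _ _ _ _ (by omega : r.toNat < L)]
  have hL1 : 1 ≤ L := by simp [hL]
  rw [hclen]
  -- A's inner loop: replace the slice by a take
  have stepA : (PySem.List.pyRange 1 (L : Int)).foldl
      (fun bad2 r =>
        if PySem.List.pyGetD colc r 0 ≤
            (PySem.List.max? (PySem.List.slice colc none (some r)) (fun x => x)).getD 0
        then bad2 ++ [(r, c)] else bad2) bad
      = (PySem.List.pyRange 1 (L : Int)).foldl
      (fun bad2 r =>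
        if PySem.List.pyGetD colc r 0 ≤
            (PySem.List.max? (List.take r.toNat colc) (fun x => x)).getD 0
        then bad2 ++ [(r, c)] else bad2) bad := by
    apply PySem.List.foldl_congr_mem
    intro b2 r hr
    obtain ⟨hr1, hr2⟩ := PySem.List.mem_pyRange_one.mp hr
    rw [PySem.List.slice_to _ (by omega)]
  -- B's inner loop: read the value through the column list
  have stepB : (PySem.List.pyRange 1 (L : Int)).foldl
      (fun (s : Int × List (Int × Int)) r =>
        if F r ≤ s.1 then (s.1, s.2 ++ [(r, c)]) else (F r, s.2))
      (PySem.List.pyGetD row0 c 0, bad)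
      = (PySem.List.pyRange 1 (L : Int)).foldl
      (fun (s : Int × List (Int × Int)) r =>
        if PySem.List.pyGetD colc r 0 ≤ s.1 then (s.1, s.2 ++ [(r, c)])
        else (PySem.List.pyGetD colc r 0, s.2))
      (PySem.List.pyGetD row0 c 0, bad) := by
    apply PySem.List.foldl_congr_mem
    intro s r hr
    obtain ⟨hr1, hr2⟩ := PySem.List.mem_pyRange_one.mp hr
    rw [hFcol r hr1 hr2]
  have hmax1 : PySem.List.max? (colc.take 1) (fun x => x)
      = some (PySem.List.pyGetD row0 c 0) := by
    rw [hcolc, PySem.List.pyRange_one_cons (by exact_mod_cast hL1)]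
    simp only [List.map_cons, List.take_succ_cons, List.take_zero]
    rw [hF]
    simp only [hn]
    rfl
  have hone : (1 : Int) = ((1 : Nat) : Int) := by norm_num
  rw [stepA, stepB, hone, ← hclen]
  exact pv_key colc c (colc.length - 1) 1 (PySem.List.pyGetD row0 c 0) bad
    (by omega) le_rfl hmax1

-- ===== VERDICT (by name: the statement is the Claim_ definition above) =====
theorem spectators_cant_see_spec : Claim_equal_spectators_cant_see := by
  intro matrix _ _
  unfold Spec_spectators_cant_see
  exact pv_ports_eq matrix
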